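-- pv_equiv track=rewrite | github.com/Hoegh07/Project-Euler | Euler759/Euler759.py | S1
-- ===== SOURCE A (Python) =====
-- MOD = 1000000007
--
-- def f(n):
--     b = 0
--     y = str(bin(n)[2:])
--     for j in range(0,len(y)):
--         if(y[j] == '1'):
--             b += 1
--     return b*n
--
-- def T(n):
--     return ((n*(n+1))//2)
--
-- memo_Sb = {}
--
-- def Sb(n):
--     if(n in memo_Sb):
--         return memo_Sb[n]
--     if(n == 0):
--         return 0
--     if(n%2 == 0):
--         c = (Sb(n//2)+Sb(n//2-1)+n//2)%MOD
--         memo_Sb[n] = c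
--         return c
--     c = (2*Sb(n//2)+n//2+1)%MOD
--     memo_Sb[n] = c
--     return c
--
-- memo_S1 = {}
--
-- def S1(n):
--     if(n in memo_S1):
--         return memo_S1[n]
--     if(n == 0):
--         return 0
--     if(n == 1):
--         return 1
--     if(n%2 == 0):
--         c = (f(1)+f(n)+4*S1(n//2-1)+Sb(n//2-1)+2*T(n//2-1)+(n//2-1))%MOD
--         memo_S1[n] = c
--         return c
--     c = (f(1)+4*S1(n//2)+Sb(n//2)+2*T(n//2)+(n//2))%MOD
--     memo_S1[n] = c
--     return c
-- ===== SOURCE B (Python) =====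
-- MOD = 1000000007
--
-- def f(n):
--     return bin(n).count('1') * n
--
-- def T(n):
--     return (n * (n + 1)) // 2
--
-- def S1(n):
--     if n == 0:
--         return 0
--     if n == 1:
--         return 1
--     # collect the halving chain n, n//2, ..., down to (but excluding) 1
--     chain = []
--     k = n
--     while k > 1:
--         chain.append(k)
--         k //= 2
--     # fold upward; state = (S1(k), S1(k-1), Sb(k), Sb(k-1)) after processing k
--     s1, s1m, sb, sbm = 1, 0, 1, 0   # values at k = 1
--     for k in reversed(chain):
--         h = k // 2
--         if k % 2 == 0:
--             nsb = (sb + sbm + h) % MOD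
--             nsbm = (2 * sbm + (h - 1) + 1) % MOD
--             ns1 = (f(1) + f(k) + 4 * s1m + sbm + 2 * T(h - 1) + (h - 1)) % MOD
--             ns1m = (f(1) + 4 * s1m + sbm + 2 * T(h - 1) + (h - 1)) % MOD
--         else:
--             nsb = (2 * sb + h + 1) % MOD
--             nsbm = (sb + sbm + h) % MOD
--             ns1 = (f(1) + 4 * s1 + sb + 2 * T(h) + h) % MOD
--             ns1m = (f(1) + f(k - 1) + 4 * s1m + sbm + 2 * T(h - 1) + (h - 1)) % MOD
--         s1, s1m, sb, sbm = ns1, ns1m, nsb, nsbm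
--     return s1
-- ===== Notes on version B (the rewrite author's own statement) =====
-- stated objective: alternative
-- what changed: The memoized mutual recursion of Sb/S1 is replaced by a single iterative upward fold over the halving chain n, n//2, ..., 1, carrying the four values (S1(k), S1(k-1), Sb(k), Sb(k-1)) in constant state, and f counts bits via bin(n).count('1') instead of an explicit character loop.
import Mathlib
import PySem

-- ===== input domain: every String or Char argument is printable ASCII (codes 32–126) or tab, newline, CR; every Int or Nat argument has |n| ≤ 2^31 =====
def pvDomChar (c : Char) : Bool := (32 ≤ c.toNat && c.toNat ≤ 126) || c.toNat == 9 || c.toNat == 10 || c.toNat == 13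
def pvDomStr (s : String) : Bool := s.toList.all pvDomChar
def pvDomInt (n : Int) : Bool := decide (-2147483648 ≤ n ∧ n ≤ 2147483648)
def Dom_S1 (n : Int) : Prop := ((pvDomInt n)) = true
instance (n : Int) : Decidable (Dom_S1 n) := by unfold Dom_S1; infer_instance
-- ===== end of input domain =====

-- B replaces the memoized recursion of Sb/S1 by a single upward fold over the halving chain of n,
-- carrying the four values (S1 k, S1 (k-1), Sb k, Sb (k-1)); same results, no recursion tree (objective: alternative).

-- ===== PORT A =====
def pvMOD : Int := 1000000007

-- A's f: count '1' characters of bin(n)[2:], times n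
def fA (n : Int) : Int :=
  let y := PySem.List.slice (PySem.Int.toBinChars0b n) (some 2) none
  let b := y.foldl (fun b c => if c = '1' then b + 1 else b) (0 : Int)
  b * n

def TA (n : Int) : Int := PySem.Int.floordiv (n * (n + 1)) 2

-- A's memoized recursion, fuel-indexed (the memo caches a pure function; fuel 0 is never hit for n ≥ 0)
def SbA : Nat → Int → Int
  | 0, _ => 0
  | fuel + 1, n =>
    if n = 0 then 0
    else if PySem.Int.mod n 2 = 0 then
      PySem.Int.mod (SbA fuel (PySem.Int.floordiv n 2) + SbA fuel (PySem.Int.floordiv n 2 - 1)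
        + PySem.Int.floordiv n 2) pvMOD
    else
      PySem.Int.mod (2 * SbA fuel (PySem.Int.floordiv n 2) + PySem.Int.floordiv n 2 + 1) pvMOD

def S1A : Nat → Int → Int
  | 0, _ => 0
  | fuel + 1, n =>
    if n = 0 then 0
    else if n = 1 then 1
    else if PySem.Int.mod n 2 = 0 then
      PySem.Int.mod (fA 1 + fA n + 4 * S1A fuel (PySem.Int.floordiv n 2 - 1)
        + SbA fuel (PySem.Int.floordiv n 2 - 1) + 2 * TA (PySem.Int.floordiv n 2 - 1)
        + (PySem.Int.floordiv n 2 - 1)) pvMOD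
    else
      PySem.Int.mod (fA 1 + 4 * S1A fuel (PySem.Int.floordiv n 2)
        + SbA fuel (PySem.Int.floordiv n 2) + 2 * TA (PySem.Int.floordiv n 2)
        + PySem.Int.floordiv n 2) pvMOD

def S1 (n : Int) : Int := S1A (n.toNat + 1) n

-- ===== PORT B =====
def fB (n : Int) : Int := (PySem.Int.bitCount n : Int) * n

def TB (n : Int) : Int := PySem.Int.floordiv (n * (n + 1)) 2

-- the halving chain n, n//2, ..., down to (but excluding) 1
def chainB (k : Int) : List Int :=
  if _h : k ≤ 1 then [] else k :: chainB (PySem.Int.floordiv k 2)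
termination_by k.toNat
decreasing_by
  rw [PySem.Int.floordiv_eq_ediv_of_pos (by norm_num : (0:Int) < 2)]
  omega

-- state = (S1 k, S1 (k-1), Sb k, Sb (k-1)); one upward step k//2 → k
def stepB (st : Int × Int × Int × Int) (k : Int) : Int × Int × Int × Int :=
  let h := PySem.Int.floordiv k 2
  if PySem.Int.mod k 2 = 0 then
    ( PySem.Int.mod (fB 1 + fB k + 4 * st.2.1 + st.2.2.2 + 2 * TB (h - 1) + (h - 1)) pvMOD,
      PySem.Int.mod (fB 1 + 4 * st.2.1 + st.2.2.2 + 2 * TB (h - 1) + (h - 1)) pvMOD,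
      PySem.Int.mod (st.2.2.1 + st.2.2.2 + h) pvMOD,
      PySem.Int.mod (2 * st.2.2.2 + (h - 1) + 1) pvMOD )
  else
    ( PySem.Int.mod (fB 1 + 4 * st.1 + st.2.2.1 + 2 * TB h + h) pvMOD,
      PySem.Int.mod (fB 1 + fB (k - 1) + 4 * st.2.1 + st.2.2.2 + 2 * TB (h - 1) + (h - 1)) pvMOD,
      PySem.Int.mod (2 * st.2.2.1 + h + 1) pvMOD,
      PySem.Int.mod (st.2.2.1 + st.2.2.2 + h) pvMOD )

def S1_alt (n : Int) : Int :=
  if n = 0 then 0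
  else if n = 1 then 1
  else ((chainB n).reverse.foldl stepB (1, 0, 1, 0)).1

-- ===== PRECONDITION & SPEC =====
-- Pre_ excludes negative arguments, on which Python's S1 recurses without reaching a base case and raises RecursionError.
def Pre_S1 (n : Int) : Prop := 0 ≤ n
instance (n : Int) : Decidable (Pre_S1 n) := by unfold Pre_S1; infer_instance
def pvWitness_S1 : Int := 6

def Spec_S1 (n : Int) (out : Int) : Prop := out = S1_alt n
instance (n : Int) (out : Int) : Decidable (Spec_S1 n out) := by unfold Spec_S1; infer_instance

-- ===== CLAIM (what is proved, stated in full; the proofs are below) =====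
def Claim_equal_S1 : Prop := ∀ (n : Int), Dom_S1 n → Pre_S1 n → Spec_S1 n (S1 n)

-- ===== LEMMAS AND PROOFS =====

-- counting '1' characters of the binary digits is the popcount
theorem count_toDigits_two (m : Nat) :
    (Nat.toDigits 2 m).count '1' = PySem.Int.bitCount (m : Int) := by
  induction m using Nat.strong_induction_on with
  | _ m ih =>
    by_cases hm : m < 2
    · interval_cases m <;> decide
    · rw [Nat.toDigits_of_base_le (by norm_num) (by omega), List.count_append,
        ih (m / 2) (by omega), PySem.Int.bitCount_natCast (show 0 < m by omega)]
      have : m % 2 = 0 ∨ m % 2 = 1 := by omega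
      rcases this with h | h <;> simp [h, Nat.digitChar] <;> omega

theorem foldl_count_one (l : List Char) (init : Int) :
    l.foldl (fun b c => if c = '1' then b + 1 else b) init = init + (l.count '1' : Int) := by
  induction l generalizing init with
  | nil => simp
  | cons c t ih =>
    simp only [List.foldl_cons, ih, List.count_cons]
    by_cases h : c = '1' <;> simp [h] <;> ring

theorem fA_eq_fB (n : Int) (hn : 0 ≤ n) : fA n = fB n := by
  have hlt : ¬ n < 0 := by omega
  have hcast : n = ((n.toNat : Nat) : Int) := by omega
  simp only [fA, fB, PySem.Int.toBinChars0b, if_neg hlt]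
  rw [show PySem.List.slice ('0' :: 'b' :: Nat.toDigits 2 n.toNat) (some 2) none
      = Nat.toDigits 2 n.toNat from by simp [PySem.List.slice]]
  rw [foldl_count_one, count_toDigits_two, hcast]
  simp only [Int.toNat_natCast]
  ring

-- fuel does not matter once it exceeds n
theorem SbA_fuel (m : Nat) : ∀ (n : Int) (f1 f2 : Nat), n.toNat = m → 0 ≤ n →
    m < f1 → m < f2 → SbA f1 n = SbA f2 n := by
  induction m using Nat.strong_induction_on with
  | _ m ih =>
    intro n f1 f2 hm hn h1 h2
    match f1, f2 with
    | f1 + 1, f2 + 1 =>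
      simp only [SbA, PySem.Int.floordiv_eq_ediv_of_pos (show (0:Int) < 2 by norm_num),
        PySem.Int.mod_eq_emod_of_pos (show (0:Int) < 2 by norm_num)]
      by_cases h0 : n = 0
      · simp [h0]
      · rw [if_neg h0, if_neg h0]
        by_cases he : n % 2 = 0
        · rw [if_pos he, if_pos he,
            ih (n / 2).toNat (by omega) (n / 2) f1 f2 rfl (by omega) (by omega) (by omega),
            ih (n / 2 - 1).toNat (by omega) (n / 2 - 1) f1 f2 rfl (by omega) (by omega) (by omega)]
        · rw [if_neg he, if_neg he,
            ih (n / 2).toNat (by omega) (n / 2) f1 f2 rfl (by omega) (by omega) (by omega)]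

theorem S1A_fuel (m : Nat) : ∀ (n : Int) (f1 f2 : Nat), n.toNat = m → 0 ≤ n →
    m < f1 → m < f2 → S1A f1 n = S1A f2 n := by
  induction m using Nat.strong_induction_on with
  | _ m ih =>
    intro n f1 f2 hm hn h1 h2
    match f1, f2 with
    | f1 + 1, f2 + 1 =>
      simp only [S1A, PySem.Int.floordiv_eq_ediv_of_pos (show (0:Int) < 2 by norm_num),
        PySem.Int.mod_eq_emod_of_pos (show (0:Int) < 2 by norm_num)]
      by_cases h0 : n = 0
      · simp [h0]
      · by_cases h1' : n = 1
        · simp [h1']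
        · rw [if_neg h0, if_neg h0, if_neg h1', if_neg h1']
          by_cases he : n % 2 = 0
          · rw [if_pos he, if_pos he,
              ih (n / 2 - 1).toNat (by omega) (n / 2 - 1) f1 f2 rfl (by omega) (by omega) (by omega),
              SbA_fuel (n / 2 - 1).toNat (n / 2 - 1) f1 f2 rfl (by omega) (by omega) (by omega)]
          · rw [if_neg he, if_neg he,
              ih (n / 2).toNat (by omega) (n / 2) f1 f2 rfl (by omega) (by omega) (by omega),
              SbA_fuel (n / 2).toNat (n / 2) f1 f2 rfl (by omega) (by omega) (by omega)]

def SbV (n : Int) : Int := SbA (n.toNat + 1) n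

theorem SbV_rec (n : Int) (hn : 1 ≤ n) :
    SbV n = if n % 2 = 0 then
        PySem.Int.mod (SbV (n / 2) + SbV (n / 2 - 1) + n / 2) pvMOD
      else
        PySem.Int.mod (2 * SbV (n / 2) + n / 2 + 1) pvMOD := by
  show SbA (n.toNat + 1) n = _
  conv_lhs => rw [SbA]
  simp only [PySem.Int.floordiv_eq_ediv_of_pos (show (0:Int) < 2 by norm_num),
    PySem.Int.mod_eq_emod_of_pos (show (0:Int) < 2 by norm_num), SbV]
  rw [if_neg (show ¬ n = 0 by omega)]
  by_cases he : n % 2 = 0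
  · rw [if_pos he, if_pos he,
      SbA_fuel (n / 2).toNat (n / 2) n.toNat ((n / 2).toNat + 1) rfl (by omega) (by omega) (by omega),
      SbA_fuel (n / 2 - 1).toNat (n / 2 - 1) n.toNat ((n / 2 - 1).toNat + 1) rfl (by omega) (by omega) (by omega)]
  · rw [if_neg he, if_neg he,
      SbA_fuel (n / 2).toNat (n / 2) n.toNat ((n / 2).toNat + 1) rfl (by omega) (by omega) (by omega)]

theorem S1_rec (n : Int) (hn : 2 ≤ n) :
    S1 n = if n % 2 = 0 then
        PySem.Int.mod (fA 1 + fA n + 4 * S1 (n / 2 - 1) + SbV (n / 2 - 1)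
          + 2 * TA (n / 2 - 1) + (n / 2 - 1)) pvMOD
      else
        PySem.Int.mod (fA 1 + 4 * S1 (n / 2) + SbV (n / 2) + 2 * TA (n / 2) + n / 2) pvMOD := by
  show S1A (n.toNat + 1) n = _
  conv_lhs => rw [S1A]
  simp only [PySem.Int.floordiv_eq_ediv_of_pos (show (0:Int) < 2 by norm_num),
    PySem.Int.mod_eq_emod_of_pos (show (0:Int) < 2 by norm_num), S1, SbV]
  rw [if_neg (show ¬ n = 0 by omega), if_neg (show ¬ n = 1 by omega)]
  by_cases he : n % 2 = 0
  · rw [if_pos he, if_pos he,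
      S1A_fuel (n / 2 - 1).toNat (n / 2 - 1) n.toNat ((n / 2 - 1).toNat + 1) rfl (by omega) (by omega) (by omega),
      SbA_fuel (n / 2 - 1).toNat (n / 2 - 1) n.toNat ((n / 2 - 1).toNat + 1) rfl (by omega) (by omega) (by omega)]
  · rw [if_neg he, if_neg he,
      S1A_fuel (n / 2).toNat (n / 2) n.toNat ((n / 2).toNat + 1) rfl (by omega) (by omega) (by omega),
      SbA_fuel (n / 2).toNat (n / 2) n.toNat ((n / 2).toNat + 1) rfl (by omega) (by omega) (by omega)]

theorem step_correct (k : Int) (hk : 2 ≤ k) :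
    stepB (S1 (k / 2), S1 (k / 2 - 1), SbV (k / 2), SbV (k / 2 - 1)) k
      = (S1 k, S1 (k - 1), SbV k, SbV (k - 1)) := by
  by_cases hk2 : k = 2
  · subst hk2; decide
  · have hk3 : 3 ≤ k := by omega
    unfold stepB
    simp only [PySem.Int.floordiv_eq_ediv_of_pos (show (0:Int) < 2 by norm_num),
      PySem.Int.mod_eq_emod_of_pos (show (0:Int) < 2 by norm_num)]
    by_cases he : k % 2 = 0
    · rw [if_pos he]
      simp only [Prod.mk.injEq]
      have e2 : (k - 1) / 2 = k / 2 - 1 := by omega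
      refine ⟨?_, ?_, ?_, ?_⟩
      · rw [S1_rec k (by omega), if_pos he, fA_eq_fB 1 (by norm_num), fA_eq_fB k (by omega),
          show TA = TB from rfl]
      · rw [S1_rec (k - 1) (by omega), if_neg (by omega), e2, fA_eq_fB 1 (by norm_num),
          show TA = TB from rfl]
      · rw [SbV_rec k (by omega), if_pos he]
      · rw [SbV_rec (k - 1) (by omega), if_neg (by omega), e2]
    · rw [if_neg he]
      simp only [Prod.mk.injEq]
      have e2 : (k - 1) / 2 = k / 2 := by omega
      refine ⟨?_, ?_, ?_, ?_⟩
      · rw [S1_rec k (by omega), if_neg he, fA_eq_fB 1 (by norm_num), show TA = TB from rfl]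
      · rw [S1_rec (k - 1) (by omega), if_pos (by omega), e2, fA_eq_fB 1 (by norm_num),
          fA_eq_fB (k - 1) (by omega), show TA = TB from rfl]
      · rw [SbV_rec k (by omega), if_neg he]
      · rw [SbV_rec (k - 1) (by omega), if_pos (by omega), e2]

theorem chain_fold (m : Nat) : ∀ (k : Int), k.toNat = m → 1 ≤ k →
    (chainB k).reverse.foldl stepB (1, 0, 1, 0) = (S1 k, S1 (k - 1), SbV k, SbV (k - 1)) := by
  induction m using Nat.strong_induction_on with
  | _ m ih =>
    intro k hm hk
    by_cases h1 : k = 1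
    · subst h1
      rw [chainB, dif_pos (by norm_num)]
      decide
    · have hk2 : 2 ≤ k := by omega
      rw [chainB, dif_neg (show ¬ k ≤ 1 by omega),
        PySem.Int.floordiv_eq_ediv_of_pos (show (0:Int) < 2 by norm_num),
        List.reverse_cons, List.foldl_append,
        ih (k / 2).toNat (by omega) (k / 2) rfl (by omega)]
      simp only [List.foldl_cons, List.foldl_nil]
      exact step_correct k hk2

-- ===== VERDICT (by name: the statement is the Claim_ definition above) =====
theorem S1_spec : Claim_equal_S1 := by
  intro n _ hpre
  show S1 n = S1_alt n
  unfold S1_alt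
  by_cases h0 : n = 0
  · subst h0; decide
  · by_cases h1 : n = 1
    · subst h1; decide
    · rw [if_neg h0, if_neg h1, chain_fold n.toNat n rfl (by unfold Pre_S1 at hpre; omega)]
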